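-- pv_equiv track=rewrite | github.com/MugshotDrippedOut/Simon | SWI/Kryptologie/ADFGVX/ADFGVX.py | twoD_to_str
-- ===== SOURCE A (Python) =====
-- def twoD_to_str(table):
--     out = ""
--     biggest = max([len(i) for i in table])
--     for i in range(0,biggest):
--         for j in table:
--             if len(j)>i:
--                 out += j[i]
--     return out
-- ===== SOURCE B (Python) =====
-- def twoD_to_str(table):
--     parts = []
--     rows = [list(r) for r in table if r]
--     while rows:
--         parts.append("".join(r[0] for r in rows))
--         rows = [r[1:] for r in rows if len(r) > 1]
--     return "".join(parts)
-- ===== Notes on version B (the rewrite author's own statement) =====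
-- stated objective: alternative
-- what changed: B replaces A's index-based double loop (range over the max length with a per-row len(j)>i check) by repeatedly peeling the leading character off a shrinking list of nonempty row tails, i.e. a structural column-by-column transpose with no indices.
import Mathlib
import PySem

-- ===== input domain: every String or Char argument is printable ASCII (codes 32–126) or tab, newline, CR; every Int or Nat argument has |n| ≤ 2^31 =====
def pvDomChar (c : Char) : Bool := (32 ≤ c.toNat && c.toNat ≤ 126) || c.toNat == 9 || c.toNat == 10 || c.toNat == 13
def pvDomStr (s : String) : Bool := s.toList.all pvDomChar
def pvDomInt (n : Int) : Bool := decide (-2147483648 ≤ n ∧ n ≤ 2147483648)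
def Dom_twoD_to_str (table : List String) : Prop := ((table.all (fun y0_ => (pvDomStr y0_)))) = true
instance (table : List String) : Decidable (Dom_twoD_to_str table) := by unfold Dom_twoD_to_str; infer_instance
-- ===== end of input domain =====

-- B reads the columns by repeatedly peeling the leading character off a shrinking
-- list of nonempty row tails instead of A's index loop; alternative structure, same cost.

-- ===== PORT A =====
def twoD_to_str (table : List String) : String :=
  -- out = ""; biggest = max([len(i) for i in table])  (max([]) raises ValueError: excluded by Pre_)
  match PySem.List.max? (table.map (fun i => PySem.Str.len i)) (fun x => x) with
  | none => ""
  | some biggest =>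
    -- for i in range(0, biggest): for j in table: if len(j) > i: out += j[i]
    String.ofList ((PySem.List.pyRange 0 biggest).foldl (fun out i =>
      table.foldl (fun out j =>
        if PySem.Str.len j > i then
          out ++ [PySem.List.pyGetD j.toList i ' ']   -- index guarded in range, so default unused
        else out) out) [])

-- ===== PORT B =====
def pvRowLenSum (rows : List (List Char)) : Nat := (rows.map List.length).sum

-- rows = [r[1:] for r in rows if len(r) > 1]
def pvStep (rows : List (List Char)) : List (List Char) :=
  (rows.filter (fun r => decide (1 < r.length))).map (fun r => r.drop 1)

-- termination helper for the while-loop of Source B (cited by pvAltGo's decreasing_by)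
theorem pvAltGo_measure (rows : List (List Char)) (h : rows ≠ []) :
    (pvStep rows).length + pvRowLenSum (pvStep rows) < rows.length + pvRowLenSum rows := by
  have aux : ∀ (l : List (List Char)),
      (pvStep l).length + pvRowLenSum (pvStep l) ≤ pvRowLenSum l := by
    intro l
    induction l with
    | nil => simp [pvStep, pvRowLenSum]
    | cons r t ih =>
      by_cases hr : 1 < r.length <;>
        simp [pvStep, pvRowLenSum, hr] at ih ⊢ <;> omega
  have hlen : 1 ≤ rows.length := by
    cases rows with
    | nil => exact absurd rfl h
    | cons a t => simp
  have := aux rows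
  omega

-- while rows: parts.append("".join(r[0] for r in rows)); rows = [r[1:] for r in rows if len(r) > 1]
def pvAltGo (rows : List (List Char)) : List (List Char) :=
  if h : rows = [] then []
  else (rows.map (fun r => r.headD ' '))   -- r[0]: every row kept nonempty, default unused
       :: pvAltGo (pvStep rows)
termination_by rows.length + pvRowLenSum rows
decreasing_by exact pvAltGo_measure rows h

def twoD_to_str_alt (table : List String) : String :=
  -- rows = [list(r) for r in table if r]; …; return "".join(parts)
  String.ofList (pvAltGo ((table.filter (fun r => !(r == ""))).map String.toList)).flatten

-- ===== PRECONDITION & SPEC =====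
-- Pre_ excludes only the empty table, on which A raises ValueError (max of an empty list).
def Pre_twoD_to_str (table : List String) : Prop := table ≠ []
instance (table : List String) : Decidable (Pre_twoD_to_str table) := by
  unfold Pre_twoD_to_str; infer_instance
def pvWitness_twoD_to_str : List String := ["ab", "c"]

def Spec_twoD_to_str (table : List String) (out : String) : Prop := out = twoD_to_str_alt table
instance (table : List String) (out : String) : Decidable (Spec_twoD_to_str table out) := by
  unfold Spec_twoD_to_str; infer_instance

-- ===== CLAIM (what is proved, stated in full; the proofs are below) =====
def Claim_equal_twoD_to_str : Prop := ∀ (table : List String), Dom_twoD_to_str table →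
  Pre_twoD_to_str table → Spec_twoD_to_str table (twoD_to_str table)
-- ===== LEMMAS AND PROOFS =====
-- the column at index i: the i-th character of every row long enough, in row order
def pvCol (rows : List (List Char)) (i : Nat) : List Char := rows.filterMap (fun r => r[i]?)

theorem pvCol_zero (rows : List (List Char)) (h : ∀ r ∈ rows, r ≠ []) :
    pvCol rows 0 = rows.map (fun r => r.headD ' ') := by
  induction rows with
  | nil => rfl
  | cons r t ih =>
    have hr := h r (by simp)
    cases r with
    | nil => exact absurd rfl hr
    | cons c cs =>
      simp [pvCol] at ih ⊢
      exact ih (fun x hx => h x (by simp [hx]))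

theorem pvCol_succ (rows : List (List Char)) (k : Nat) :
    pvCol rows (k + 1) = pvCol (pvStep rows) k := by
  induction rows with
  | nil => rfl
  | cons r t ih =>
    by_cases hr : 1 < r.length
    · have hstep : pvStep (r :: t) = r.drop 1 :: pvStep t := by
        simp [pvStep, hr]
      have hget : r[k + 1]? = (r.drop 1)[k]? := by
        rw [List.getElem?_drop, Nat.add_comm]
      rw [hstep]
      unfold pvCol
      rw [List.filterMap_cons, List.filterMap_cons, hget]
      have iht : List.filterMap (fun r => r[k + 1]?) t = List.filterMap (fun r => r[k]?) (pvStep t) := ih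
      rw [iht]
    · have hstep : pvStep (r :: t) = pvStep t := by
        simp [pvStep, hr]
      have hnone : r[k + 1]? = none := List.getElem?_eq_none (by omega)
      rw [hstep]
      unfold pvCol
      rw [List.filterMap_cons, hnone]
      exact ih

-- empty rows contribute nothing to any column
theorem pvCol_filter_empty (table : List String) (k : Nat) :
    pvCol (table.map String.toList) k
      = pvCol ((table.filter (fun r => !(r == ""))).map String.toList) k := by
  induction table with
  | nil => rfl
  | cons s t ih =>
    by_cases hs : s = ""
    · subst hs
      simp [pvCol] at ih ⊢
      exact ih
    · have hb : (s == "") = false := by simp [hs]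
      simp [pvCol, hb, List.filterMap_cons] at ih ⊢
      cases hx : s.toList[k]? <;> simp [hx, ih]

-- the while loop reads exactly the columns 0 … N-1
theorem pvAltGo_flatten (fuel : Nat) :
    ∀ (rows : List (List Char)) (N : Nat),
      rows.length + pvRowLenSum rows ≤ fuel →
      (∀ r ∈ rows, r ≠ []) →
      (∀ r ∈ rows, r.length ≤ N) →
      (pvAltGo rows).flatten = (List.range N).flatMap (pvCol rows) := by
  induction fuel with
  | zero =>
    intro rows N hfuel _ _
    have : rows = [] := by
      cases rows with
      | nil => rfl
      | cons a t => simp at hfuel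
    subst this
    rw [pvAltGo]
    simp [pvCol]
  | succ fuel ih =>
    intro rows N hfuel hne hlen
    by_cases h : rows = []
    · subst h
      rw [pvAltGo]
      simp [pvCol]
    · -- rows nonempty, so some row has length ≥ 1 ≤ N, hence N ≥ 1
      obtain ⟨r0, hr0⟩ : ∃ r, r ∈ rows := by
        cases rows with
        | nil => exact absurd rfl h
        | cons a t => exact ⟨a, by simp⟩
      have hr0ne := hne r0 hr0
      have hN1 : 1 ≤ N := by
        have := hlen r0 hr0
        have : 0 < r0.length := List.length_pos_iff.mpr hr0ne
        omega
      obtain ⟨N', rfl⟩ : ∃ N', N = N' + 1 := ⟨N - 1, by omega⟩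
      rw [pvAltGo]
      simp only [h, dite_false]
      set rows' := pvStep rows with hrows'
      have hrec : (pvAltGo rows').flatten = (List.range N').flatMap (pvCol rows') := by
        apply ih
        · have hm := pvAltGo_measure rows h
          rw [← hrows'] at hm
          omega
        · intro r hr
          simp only [hrows', pvStep, List.mem_map, List.mem_filter] at hr
          obtain ⟨s, ⟨_, hs2⟩, rfl⟩ := hr
          have h2 : 1 < s.length := by simpa using hs2
          have h3 : 0 < (s.drop 1).length := by simp; omega
          exact List.length_pos_iff.mp h3
        · intro r hr
          simp only [hrows', pvStep, List.mem_map, List.mem_filter] at hr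
          obtain ⟨s, ⟨hs1, _⟩, rfl⟩ := hr
          have := hlen s hs1
          simp; omega
      rw [List.range_succ_eq_map]
      simp only [List.flatMap_cons, List.flatMap_map, List.flatten_cons]
      rw [pvCol_zero rows hne]
      congr 1
      rw [hrec]
      have hfun : (fun a => pvCol rows (a + 1)) = pvCol rows' := by
        funext k; exact pvCol_succ rows k
      rw [hfun]

-- A's nested loops produce exactly the columns 0 … biggest-1, concatenated
theorem pvA_inner (i : Int) (hi : 0 ≤ i) (table : List String) (out : List Char) :
    table.foldl (fun out j =>
        if PySem.Str.len j > i then out ++ [PySem.List.pyGetD j.toList i ' '] else out) out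
      = out ++ pvCol (table.map String.toList) i.toNat := by
  induction table generalizing out with
  | nil => simp [pvCol]
  | cons s t ih =>
    simp only [List.foldl_cons, List.map_cons]
    by_cases hlt : PySem.Str.len s > i
    · have hlen : i.toNat < s.toList.length := by rw [PySem.Str.len_eq] at hlt; omega
      have hget : PySem.List.pyGetD s.toList i ' ' = s.toList[i.toNat] :=
        PySem.List.pyGetD_eq_getElem s.toList ' ' hi (by omega)
      rw [if_pos hlt, ih, hget]
      have hcol : pvCol (s.toList :: t.map String.toList) i.toNat
          = s.toList[i.toNat] :: pvCol (t.map String.toList) i.toNat := by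
        simp [pvCol, List.getElem?_eq_getElem hlen]
      rw [hcol]
      simp
    · have hlen : ¬ i.toNat < s.toList.length := by rw [PySem.Str.len_eq] at hlt; omega
      have hnone : s.toList[i.toNat]? = none := List.getElem?_eq_none (by omega)
      rw [if_neg hlt, ih]
      have hcol : pvCol (s.toList :: t.map String.toList) i.toNat
          = pvCol (t.map String.toList) i.toNat := by
        simp [pvCol, hnone]
      rw [hcol]

-- ===== VERDICT (by name: the statement is the Claim_ definition above) =====
theorem twoD_to_str_spec : Claim_equal_twoD_to_str := by
  intro table0 _ hpre
  unfold Spec_twoD_to_str twoD_to_str_alt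
  obtain ⟨s0, t0, rfl⟩ : ∃ s t, table0 = s :: t := by
    cases table0 with
    | nil => exact absurd rfl hpre
    | cons a t => exact ⟨a, t, rfl⟩
  generalize htab : s0 :: t0 = table
  cases hmax : PySem.List.max? (table.map (fun i => PySem.Str.len i)) (fun x => x) with
  | none =>
    rw [PySem.List.max?_eq_none_iff] at hmax
    rw [← htab] at hmax
    simp at hmax
  | some b =>
    simp only [twoD_to_str, hmax]
    have hb0 : 0 ≤ b := by
      have hmem := PySem.List.max?_mem hmax
      simp only [List.mem_map] at hmem
      obtain ⟨j, _, rfl⟩ := hmem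
      rw [PySem.Str.len_eq]; exact Int.natCast_nonneg _
    have hmaxle : ∀ j ∈ table, PySem.Str.len j ≤ b := by
      intro j hj
      exact PySem.List.max?_isMax hmax _ (List.mem_map_of_mem hj)
    -- rewrite A's loops into flatMap of columns
    have houter : ((PySem.List.pyRange 0 b).foldl (fun out i =>
        table.foldl (fun out j =>
          if PySem.Str.len j > i then out ++ [PySem.List.pyGetD j.toList i ' '] else out) out) [])
        = (PySem.List.pyRange 0 b).flatMap (fun i => pvCol (table.map String.toList) i.toNat) := by
      rw [PySem.List.foldl_congr_mem _ _ (fun out i => out ++ pvCol (table.map String.toList) i.toNat) _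
        (by
          intro acc i hi
          have h0i : 0 ≤ i := (PySem.List.mem_pyRange_one.mp hi).1
          exact pvA_inner i h0i table acc)]
      rw [PySem.List.foldl_append_eq_flatMap]
      simp
    rw [houter]
    -- turn the Int range into a Nat range
    obtain ⟨N, rfl⟩ : ∃ N : Nat, b = (N : Int) := ⟨b.toNat, by omega⟩
    rw [PySem.List.pyRange_zero_natCast]
    rw [List.flatMap_map]
    simp only [Int.toNat_natCast]
    -- switch to the filtered rows B works on, then apply the loop lemma
    have hcols : (fun k : Nat => pvCol (table.map String.toList) k)
        = pvCol ((table.filter (fun r => !(r == ""))).map String.toList) := by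
      funext k; exact pvCol_filter_empty table k
    rw [hcols]
    congr 1
    symm
    apply pvAltGo_flatten (((table.filter (fun r => !(r == ""))).map String.toList).length
      + pvRowLenSum (((table.filter (fun r => !(r == ""))).map String.toList)))
    · exact le_refl _
    · intro r hr
      simp only [List.mem_map, List.mem_filter] at hr
      obtain ⟨s, ⟨_, hs⟩, rfl⟩ := hr
      simp only [Bool.not_eq_eq_eq_not, Bool.not_true, beq_eq_false_iff_ne] at hs
      intro hcon
      exact hs (by
        have := congrArg String.ofList hcon
        simpa using this)
    · intro r hr
      simp only [List.mem_map, List.mem_filter] at hr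
      obtain ⟨s, ⟨hs1, _⟩, rfl⟩ := hr
      have := hmaxle s hs1
      rw [PySem.Str.len_eq] at this
      omega
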